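-- pv_equiv track=rewrite | github.com/Satsuoni/widevine-l3-guesser | misc/Memsearcher.py | cnPack
-- ===== SOURCE A (Python) =====
-- def cnPack(lst,stp=0):
--   eax=0
--   ret=[]
--   for k in range(stp,len(lst),1):
--     ebx=lst[k]&3
--     ebx=(ebx<<(eax&6))# 110
--     ecx=((k-stp)>>2)
--     while len(ret)<ecx+1: ret.append(0)
--     ret[ecx]|=ebx
--     eax+=2
--   return ret
-- ===== SOURCE B (Python) =====
-- def cnPack(lst, stp=0):
--     vals = [lst[k] & 3 for k in range(stp, len(lst))]
--     ret = []
--     for i in range(0, len(vals), 4):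
--         v = 0
--         for j, x in enumerate(vals[i:i+4]):
--             v |= x << (2 * j)
--         ret.append(v)
--     return ret
-- ===== Notes on version B (the rewrite author's own statement) =====
-- stated objective: alternative
-- what changed: B precomputes the masked 2-bit value list once and packs it in explicit chunks of four with per-chunk shifts, instead of A's flat index loop with a running shift counter and lazy while-append growth of the output list.
import Mathlib
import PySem

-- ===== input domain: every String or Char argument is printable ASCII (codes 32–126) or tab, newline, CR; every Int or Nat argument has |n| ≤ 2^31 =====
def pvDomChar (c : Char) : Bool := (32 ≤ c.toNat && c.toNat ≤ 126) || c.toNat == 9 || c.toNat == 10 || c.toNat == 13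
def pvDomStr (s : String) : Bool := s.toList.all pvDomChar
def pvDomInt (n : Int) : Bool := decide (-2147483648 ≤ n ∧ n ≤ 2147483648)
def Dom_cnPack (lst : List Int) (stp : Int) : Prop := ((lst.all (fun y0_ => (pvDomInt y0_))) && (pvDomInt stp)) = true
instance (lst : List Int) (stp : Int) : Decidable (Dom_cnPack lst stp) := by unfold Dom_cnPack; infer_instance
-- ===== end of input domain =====

-- B packs the 2-bit values chunk-by-chunk (precomputed value list, explicit groups of four)
-- instead of A's flat loop with a running shift counter and lazy output growth; objective: alternative.

-- ===== PORT A =====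
-- 'while len(ret)<ecx+1: ret.append(0)' of A, step for step
def padWhile (ret : List Int) (ecx : Int) : List Int :=
  if (ret.length : Int) < ecx + 1 then padWhile (ret ++ [0]) ecx else ret
termination_by (ecx + 1 - ret.length).toNat
decreasing_by simp; omega

-- one iteration of A's 'for k in range(stp,len(lst),1)' loop; state = (eax, ret)
def cnPackStep (lst : List Int) (stp : Int) (s : Int × List Int) (k : Int) : Int × List Int :=
  let ebx := PySem.Int.band (PySem.List.pyGetD lst k 0) 3
  let ebx := ebx <<< (PySem.Int.band s.1 6).toNat
  let ecx := (k - stp) >>> (2 : Nat)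
  let ret := padWhile s.2 ecx
  let ret := PySem.List.pySetD ret ecx (PySem.Int.bor (PySem.List.pyGetD ret ecx 0) ebx)
  (s.1 + 2, ret)

def cnPack (lst : List Int) (stp : Int) : List Int :=
  ((PySem.List.pyRange stp (PySem.List.len lst) 1).foldl (cnPackStep lst stp) (0, [])).2

-- ===== PORT B =====
-- 'v = 0; for j, x in enumerate(chunk): v |= x << (2*j)' of B
def cnChunkVal (chunk : List Int) : Int :=
  (PySem.List.enumerate chunk 0).foldl (fun v p => PySem.Int.bor v (p.2 <<< (2 * p.1).toNat)) 0

def cnPack_alt (lst : List Int) (stp : Int) : List Int :=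
  let vals := (PySem.List.pyRange stp (PySem.List.len lst) 1).map
      (fun k => PySem.Int.band (PySem.List.pyGetD lst k 0) 3)
  (PySem.List.pyRange 0 (PySem.List.len vals) 4).foldl
    (fun ret i => ret ++ [cnChunkVal (PySem.List.slice vals (some i) (some (i + 4)))]) []

-- ===== PRECONDITION & SPEC =====
-- A raises IndexError iff stp < -len(lst) (then lst[stp] is out of range); Pre_ is exactly where A returns.
def Pre_cnPack (lst : List Int) (stp : Int) : Prop := -(lst.length : Int) ≤ stp
instance (lst : List Int) (stp : Int) : Decidable (Pre_cnPack lst stp) := by unfold Pre_cnPack; infer_instance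
def pvWitness_cnPack : List Int × Int := ([1, 2, 3, 4, 5], -4)

def Spec_cnPack (lst : List Int) (stp : Int) (out : List Int) : Prop := out = cnPack_alt lst stp
instance (lst : List Int) (stp : Int) (out : List Int) : Decidable (Spec_cnPack lst stp out) := by unfold Spec_cnPack; infer_instance

-- ===== CLAIM (what is proved, stated in full; the proofs are below) =====
def Claim_equal_cnPack : Prop := ∀ (lst : List Int) (stp : Int), Dom_cnPack lst stp → Pre_cnPack lst stp → Spec_cnPack lst stp (cnPack lst stp)

-- ===== LEMMAS AND PROOFS =====

-- A's loop body re-indexed by the loop counter c = k - stp (proof-side helper)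
def updA (ret : List Int) (c : Nat) (v : Int) : List Int :=
  let ret1 := padWhile ret ((c / 4 : Nat) : Int)
  PySem.List.pySetD ret1 ((c / 4 : Nat) : Int)
    (PySem.Int.bor (PySem.List.pyGetD ret1 ((c / 4 : Nat) : Int) 0) (v <<< ((2 * c) &&& 6)))

def goA : Nat → List Int → List Int → List Int
  | _, ret, [] => ret
  | c, ret, v :: vs => goA (c + 1) (updA ret c v) vs

-- common spec: pack the value list in chunks of four
def packSpec (vs : List Int) : List Int :=
  if h : vs = [] then [] else cnChunkVal (vs.take 4) :: packSpec (vs.drop 4)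
termination_by vs.length
decreasing_by cases vs with | nil => exact absurd rfl h | cons a t => simp

lemma land26 (c : Nat) : (2 * c) &&& 6 = 2 * (c % 4) := by
  have h1 : 2 * c &&& 6 = 2 * (c &&& 3) := by
    have := Nat.shiftLeft_and_distrib (a := c) (b := 3) (i := 1)
    simpa [Nat.shiftLeft_eq, Nat.mul_comm] using this.symm
  have h2 : c &&& 3 = c % 4 := by
    simpa using Nat.and_two_pow_sub_one_eq_mod c 2
  rw [h1, h2]

lemma padWhile_id (ret : List Int) (ecx : Int) (h : ecx + 1 ≤ (ret.length : Int)) :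
    padWhile ret ecx = ret := by
  rw [padWhile, if_neg (by omega)]

lemma padWhile_one (ret : List Int) (q : Nat) (h : ret.length = q) :
    padWhile ret (q : Int) = ret ++ [0] := by
  rw [padWhile, if_pos (by omega), padWhile_id _ _ (by simp [h])]

lemma set_last (ret : List Int) (w v : Int) (q : Nat) (h : ret.length = q) :
    (ret ++ [w]).set q v = ret ++ [v] := by subst h; simp

lemma getD_last (ret : List Int) (w : Int) (q : Nat) (h : ret.length = q) :
    (ret ++ [w]).getD q 0 = w := by subst h; simp

lemma updA_fresh (ret : List Int) (q : Nat) (v : Int)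
    (h : ret.length = q) :
    updA ret (4 * q) v = ret ++ [PySem.Int.bor 0 (v <<< (0 : Nat))] := by
  simp only [updA]
  have hdiv : (4 * q) / 4 = q := by omega
  have hsh : (2 * (4 * q)) &&& 6 = 0 := by rw [land26]; omega
  rw [hdiv, hsh, padWhile_one ret q h, PySem.List.pySetD_natCast, PySem.List.pyGetD_natCast,
    getD_last ret 0 q h, set_last ret 0 _ q h]

lemma updA_next (ret : List Int) (q : Nat) (w v : Int) (j : Nat) (hj : 0 < j ∧ j < 4)
    (h : ret.length = q) :
    updA (ret ++ [w]) (4 * q + j) v = ret ++ [PySem.Int.bor w (v <<< (2 * j))] := by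
  simp only [updA]
  have hdiv : (4 * q + j) / 4 = q := by omega
  have hsh : (2 * (4 * q + j)) &&& 6 = 2 * j := by
    rw [land26]; congr 1; omega
  rw [hdiv, hsh, padWhile_id _ _ (by simp [h]), PySem.List.pySetD_natCast,
    PySem.List.pyGetD_natCast, getD_last ret w q h, set_last ret w _ q h]

lemma packSpec_nil : packSpec [] = [] := by rw [packSpec]; simp

lemma packSpec_cons (vs : List Int) (h : vs ≠ []) :
    packSpec vs = cnChunkVal (vs.take 4) :: packSpec (vs.drop 4) := by
  rw [packSpec, dif_neg h]

-- goA, started at a chunk boundary with a complete prefix, produces the chunked packing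
lemma goA_packSpec (n : Nat) : ∀ (vs : List Int) (q : Nat) (ret : List Int),
    vs.length ≤ n → ret.length = q → goA (4 * q) ret vs = ret ++ packSpec vs := by
  induction n with
  | zero =>
    intro vs q ret hn hq
    have : vs = [] := by cases vs <;> simp_all
    subst this; simp [goA, packSpec_nil]
  | succ n ih =>
    intro vs q ret hn hq
    match vs with
    | [] => simp [goA, packSpec_nil]
    | [a] =>
      simp only [goA]
      rw [updA_fresh ret q a hq]
      rw [packSpec_cons _ (by simp)]
      simp [packSpec_nil, cnChunkVal, PySem.List.enumerate_cons, PySem.List.enumerate_nil]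
    | [a, b] =>
      simp only [goA]
      rw [updA_fresh ret q a hq,
        updA_next ret q _ b 1 (by omega) hq]
      rw [packSpec_cons _ (by simp)]
      simp [packSpec_nil, cnChunkVal, PySem.List.enumerate_cons, PySem.List.enumerate_nil]
    | [a, b, c] =>
      simp only [goA]
      rw [updA_fresh ret q a hq,
        updA_next ret q _ b 1 (by omega) hq,
        show 4 * q + 1 + 1 = 4 * q + 2 from by omega,
        updA_next ret q _ c 2 (by omega) hq]
      rw [packSpec_cons _ (by simp)]
      simp [packSpec_nil, cnChunkVal, PySem.List.enumerate_cons, PySem.List.enumerate_nil]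
    | a :: b :: c :: d :: r =>
      simp only [goA]
      rw [updA_fresh ret q a hq,
        updA_next ret q _ b 1 (by omega) hq,
        show 4 * q + 1 + 1 = 4 * q + 2 from by omega,
        updA_next ret q _ c 2 (by omega) hq,
        show 4 * q + 2 + 1 = 4 * q + 3 from by omega,
        updA_next ret q _ d 3 (by omega) hq,
        show 4 * q + 3 + 1 = 4 * (q + 1) from by omega]
      rw [packSpec_cons (a :: b :: c :: d :: r) (by simp)]
      rw [ih r (q + 1) _ (by simp at hn; omega) (by simp [hq])]
      simp [cnChunkVal, PySem.List.enumerate_cons, PySem.List.enumerate_nil]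

-- A's fold over range(stp, len, 1), re-expressed as goA over the masked value list
lemma A_fold (lst : List Int) (stp L : Int) (n : Nat) : ∀ (c : Nat) (ret : List Int),
    (L - stp - c).toNat ≤ n →
    ((PySem.List.pyRange (stp + c) L 1).foldl (cnPackStep lst stp) (2 * (c : Int), ret)).2
      = goA c ret ((PySem.List.pyRange (stp + c) L 1).map
          (fun k => PySem.Int.band (PySem.List.pyGetD lst k 0) 3)) := by
  induction n with
  | zero =>
    intro c ret h
    rw [PySem.List.pyRange_one_eq_nil (by omega)]
    simp [goA]
  | succ n ih =>
    intro c ret h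
    by_cases hlt : stp + (c : Int) < L
    · rw [PySem.List.pyRange_one_cons hlt]
      simp only [List.foldl_cons, List.map_cons]
      have hstep : cnPackStep lst stp (2 * (c : Int), ret) (stp + c)
          = (2 * ((c + 1 : Nat) : Int), updA ret c (PySem.Int.band (PySem.List.pyGetD lst (stp + c) 0) 3)) := by
        simp only [cnPackStep, updA]
        have e1 : stp + (c : Int) - stp = ((c : Nat) : Int) := by ring
        have e2 : ((c : Nat) : Int) >>> (2 : Nat) = (((c / 4 : Nat) : Nat) : Int) := by
          rw [← Int.natCast_shiftRight]
          congr 1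
          simp [Nat.shiftRight_eq_div_pow]
        have e3 : (PySem.Int.band (2 * (c : Int)) 6).toNat = (2 * c) &&& 6 := by
          have : (2 * (c : Int)) = ((2 * c : Nat) : Int) := by push_cast; ring
          rw [this, show (6 : Int) = ((6 : Nat) : Int) from rfl, PySem.Int.band_natCast]
          simp
        rw [e1, e2, e3]
        simp only [Prod.mk.injEq]
        exact ⟨by push_cast; ring, trivial⟩
      rw [hstep, goA]
      have e4 : stp + (c : Int) + 1 = stp + ((c + 1 : Nat) : Int) := by push_cast; ring
      rw [e4]
      exact ih (c + 1) _ (by omega)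
    · rw [PySem.List.pyRange_one_eq_nil (by omega)]
      simp [goA]

-- step-4 range induction forms
lemma pyRange4_nil (a b : Int) (h : b ≤ a) : PySem.List.pyRange a b 4 = [] := by
  rw [PySem.List.pyRange_of_pos _ _ (by norm_num)]
  rw [if_neg (by omega)]
  simp

lemma pyRange4_cons (a b : Int) (h : a < b) : PySem.List.pyRange a b 4 = a :: PySem.List.pyRange (a + 4) b 4 := by
  rw [PySem.List.pyRange_of_pos _ _ (by norm_num), PySem.List.pyRange_of_pos _ _ (by norm_num)]
  rw [if_pos h]
  have hm : ((b - a + 4 - 1) / 4).toNat = ((b - a + 4 - 1) / 4).toNat - 1 + 1 := by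
    have : 1 ≤ (b - a + 4 - 1) / 4 := by omega
    omega
  rw [hm, List.range_succ_eq_map]
  simp only [List.map_cons, List.map_map]
  congr 1
  · norm_num
  · by_cases h4 : a + 4 < b
    · rw [if_pos h4]
      have : ((b - a + 4 - 1) / 4).toNat - 1 = ((b - (a + 4) + 4 - 1) / 4).toNat := by omega
      rw [this]
      apply List.map_congr_left
      intro k _
      simp [Function.comp]
      ring
    · rw [if_neg h4]
      have : ((b - a + 4 - 1) / 4).toNat - 1 = 0 := by omega
      simp [this]

-- B's chunk loop produces the chunked packing
lemma B_fold (vals : List Int) (n : Nat) : ∀ (i : Nat) (ret : List Int),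
    vals.length - i ≤ n →
    ((PySem.List.pyRange (i : Int) ((vals.length : Nat) : Int) 4).foldl
      (fun ret j => ret ++ [cnChunkVal (PySem.List.slice vals (some j) (some (j + 4)))]) ret)
      = ret ++ packSpec (vals.drop i) := by
  induction n with
  | zero =>
    intro i ret h
    rw [pyRange4_nil _ _ (by omega), List.drop_eq_nil_of_le (by omega)]
    simp [packSpec]
  | succ n ih =>
    intro i ret h
    by_cases hlt : (i : Int) < (vals.length : Int)
    · rw [pyRange4_cons _ _ hlt]
      simp only [List.foldl_cons]
      have hsl : PySem.List.slice vals (some (i : Int)) (some ((i : Int) + 4))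
          = (vals.drop i).take 4 := by
        rw [show ((4 : Int)) = ((4 : Nat) : Int) from rfl, PySem.List.slice_natCast_add]
      have e4 : (i : Int) + 4 = ((i + 4 : Nat) : Int) := by push_cast; ring
      rw [hsl, e4, ih (i + 4) _ (by omega)]
      have hne : vals.drop i ≠ [] := by
        simp [List.drop_eq_nil_iff]
        omega
      rw [packSpec_cons _ hne]
      rw [show (vals.drop i).drop 4 = vals.drop (i + 4) from by simp]
      simp
    · rw [pyRange4_nil _ _ (by omega), List.drop_eq_nil_of_le (by omega)]
      simp [packSpec]

-- ===== VERDICT (by name: the statement is the Claim_ definition above) =====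
theorem cnPack_spec : Claim_equal_cnPack := by
  intro lst stp _ _
  unfold Spec_cnPack cnPack cnPack_alt
  have hA := A_fold lst stp (PySem.List.len lst) ((PySem.List.len lst) - stp).toNat 0 [] (by omega)
  simp only [Nat.cast_zero, add_zero, mul_zero] at hA
  rw [hA]
  have hB := B_fold ((PySem.List.pyRange stp (PySem.List.len lst) 1).map
      (fun k => PySem.Int.band (PySem.List.pyGetD lst k 0) 3)) _ 0 [] (le_refl _)
  simp only [Nat.cast_zero, List.drop_zero, List.nil_append] at hB
  have hmain := goA_packSpec ((PySem.List.pyRange stp (PySem.List.len lst) 1).map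
      (fun k => PySem.Int.band (PySem.List.pyGetD lst k 0) 3)).length
      ((PySem.List.pyRange stp (PySem.List.len lst) 1).map
      (fun k => PySem.Int.band (PySem.List.pyGetD lst k 0) 3)) 0 [] (le_refl _) rfl
  simp only [mul_zero, List.nil_append] at hmain
  rw [hmain]
  rw [← hB]
  simp [PySem.List.len_eq]
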